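-- pv_equiv track=rewrite | github.com/ankit-vatsa/SRMKTRLAB | AI with application in Cloud Lab/003.Latin square.py | latin_square
-- ===== SOURCE A (Python) =====
-- def latin_square(n):
--     if n <= 0:
--         return None
-- # square = [[0] * n for _ in range(n)] - Creates an n x n matrix (list of lists) filled with zeros. This will be the Latin square.
--     square = [[0] * n for _ in range(n)]
--
--     for i in range(n):
--         for j in range(n):
--             square[i][j] = (i + j) % n + 1
--
--     return square
-- ===== SOURCE B (Python) =====
-- def latin_square(n):
--     if n <= 0:
--         return None
--     row = list(range(1, n + 1))
--     square = [row]
--     for _ in range(n - 1):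
--         row = row[1:] + row[:1]
--         square.append(row)
--     return square
-- ===== Notes on version B (the rewrite author's own statement) =====
-- stated objective: simpler
-- what changed: Each row is derived from its predecessor by a one-position left rotation (row[1:]+row[:1]) starting from list(range(1,n+1)), instead of filling a zero matrix cell by cell with (i+j)%n+1.
import Mathlib
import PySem

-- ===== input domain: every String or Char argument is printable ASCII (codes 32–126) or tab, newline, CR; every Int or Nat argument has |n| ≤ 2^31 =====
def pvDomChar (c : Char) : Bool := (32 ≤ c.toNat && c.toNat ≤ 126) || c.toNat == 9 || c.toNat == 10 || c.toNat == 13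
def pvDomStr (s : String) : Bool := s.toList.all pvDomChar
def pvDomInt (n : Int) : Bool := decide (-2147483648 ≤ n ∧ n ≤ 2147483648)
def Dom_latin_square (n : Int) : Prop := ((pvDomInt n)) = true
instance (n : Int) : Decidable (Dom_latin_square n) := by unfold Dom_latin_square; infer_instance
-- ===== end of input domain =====

-- B builds each row as a one-position left rotation of the previous row instead of
-- filling a zero matrix cell by cell with (i+j)%n+1; objective: simpler.

-- ===== PORT A =====
def latin_square (n : Int) : Option (List (List Int)) :=
  if n ≤ 0 then none
  else
    -- square = [[0] * n for _ in range(n)], then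
    -- for i in range(n): for j in range(n): square[i][j] = (i + j) % n + 1
    -- i, j drawn from range(n) are nonnegative in-range indices, so set at .toNat is exact
    some ((PySem.List.pyRange 0 n 1).foldl (fun sq i =>
      (PySem.List.pyRange 0 n 1).foldl (fun sq j =>
        sq.set i.toNat ((sq.getD i.toNat []).set j.toNat (PySem.Int.mod (i + j) n + 1))) sq)
      ((PySem.List.pyRange 0 n 1).map (fun _ => List.replicate n.toNat 0)))

-- ===== PORT B =====
def latin_square_alt (n : Int) : Option (List (List Int)) :=
  if n ≤ 0 then none
  else
    -- row = list(range(1, n + 1)); square = [row]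
    -- for _ in range(n - 1): row = row[1:] + row[:1]; square.append(row)
    some (((PySem.List.pyRange 0 (n - 1) 1).foldl
      (fun (st : List Int × List (List Int)) _ =>
        let r := PySem.List.slice st.1 (some 1) none ++ PySem.List.slice st.1 none (some 1)
        (r, st.2 ++ [r]))
      (PySem.List.pyRange 1 (n + 1) 1, [PySem.List.pyRange 1 (n + 1) 1])).2)

-- ===== PRECONDITION & SPEC =====
def Spec_latin_square (n : Int) (out : Option (List (List Int))) : Prop := out = latin_square_alt n
instance (n : Int) (out : Option (List (List Int))) : Decidable (Spec_latin_square n out) := by unfold Spec_latin_square; infer_instance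

-- ===== CLAIM (what is proved, stated in full; the proofs are below) =====
def Claim_equal_latin_square : Prop := ∀ (n : Int), Dom_latin_square n → Spec_latin_square n (latin_square n)

-- ===== LEMMAS AND PROOFS =====

-- the i-th row of the square: [(i+j) % n + 1 for j in range(n)]
def rowF (n i : Int) : List Int := (List.range n.toNat).map (fun (j : Nat) => PySem.Int.mod (i + (j : Int)) n + 1)

theorem length_rowF (n i : Int) : (rowF n i).length = n.toNat := by simp [rowF]

theorem getElem_rowF (n i : Int) (k : Nat) (h : k < (rowF n i).length) :
    (rowF n i)[k] = PySem.Int.mod (i + (k : Int)) n + 1 := by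
  simp only [rowF, List.getElem_map, List.getElem_range]

theorem take_succ_set {α : Type} (l : List α) (k : Nat) (v : α) (hk : k < l.length) :
    (l.set k v).take (k + 1) = l.take k ++ [v] := by
  induction l generalizing k with
  | nil => simp at hk
  | cons x xs ih =>
    cases k with
    | zero => simp
    | succ k => simp [ih k (by simpa using hk)]

-- the inner loop sets only row k; it equals setting row k to the row-level fold
theorem inner_mat (f : Int → Int) (k : Nat) :
    ∀ (L : List Int) (sq : List (List Int)), k < sq.length →
    L.foldl (fun sq j => sq.set k ((sq.getD k []).set j.toNat (f j))) sq
      = sq.set k (L.foldl (fun r j => r.set j.toNat (f j)) (sq.getD k [])) := by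
  intro L
  induction L with
  | nil => intro sq h; simp [List.getElem?_eq_getElem h]
  | cons x L ih =>
    intro sq h
    simp only [List.foldl_cons]
    rw [ih _ (by simpa using h)]
    rw [List.set_set]
    congr 1
    rw [List.getD_eq_getElem?_getD, List.getElem?_set_self (by simpa using h)]
    simp

theorem map_pyRange_zero {β : Type} (f : Int → β) (n : Int) :
    (PySem.List.pyRange 0 n 1).map f = (List.range n.toNat).map (fun k : Nat => f (k : Int)) := by
  apply List.ext_getElem
  · simp [PySem.List.length_pyRange_one]
  · intro k h1 h2
    simp [PySem.List.getElem_pyRange_one]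

-- the row-level fold over range(a, n) rewrites positions ≥ a
theorem inner_row (n : Int) (f : Int → Int) :
    ∀ (m : Nat) (a : Int), 0 ≤ a → (n - a).toNat = m →
    ∀ (r : List Int), r.length = n.toNat →
    (PySem.List.pyRange a n 1).foldl (fun r j => r.set j.toNat (f j)) r
      = r.take a.toNat ++ (PySem.List.pyRange a n 1).map f := by
  intro m
  induction m with
  | zero =>
    intro a ha hm r hr
    rw [PySem.List.pyRange_one_eq_nil (show n ≤ a by omega)]
    rw [List.take_of_length_le (by rw [hr]; omega)]
    simp
  | succ m ih =>
    intro a ha hm r hr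
    have hab : a < n := by omega
    rw [PySem.List.pyRange_one_cons hab]
    simp only [List.foldl_cons, List.map_cons]
    rw [ih (a + 1) (by omega) (by omega) _ (by simpa using hr)]
    rw [show (a + 1).toNat = a.toNat + 1 by omega]
    rw [take_succ_set r a.toNat (f a) (by omega)]
    simp

-- the outer loop turns rows [a, n) into rowF rows
theorem outer_loop (n : Int) (hn : 0 < n) :
    ∀ (m : Nat) (a : Int), 0 ≤ a → (n - a).toNat = m →
    ∀ (sq : List (List Int)), sq.length = n.toNat → (∀ r ∈ sq, r.length = n.toNat) →
    (PySem.List.pyRange a n 1).foldl (fun sq i =>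
      (PySem.List.pyRange 0 n 1).foldl (fun sq j =>
        sq.set i.toNat ((sq.getD i.toNat []).set j.toNat (PySem.Int.mod (i + j) n + 1))) sq) sq
      = sq.take a.toNat ++ (PySem.List.pyRange a n 1).map (rowF n) := by
  intro m
  induction m with
  | zero =>
    intro a ha hm sq hlen hrows
    rw [PySem.List.pyRange_one_eq_nil (show n ≤ a by omega)]
    rw [List.take_of_length_le (by rw [hlen]; omega)]
    simp
  | succ m ih =>
    intro a ha hm sq hlen hrows
    have hab : a < n := by omega
    have hk : a.toNat < sq.length := by rw [hlen]; omega
    rw [PySem.List.pyRange_one_cons hab]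
    simp only [List.foldl_cons, List.map_cons]
    rw [inner_mat (fun j => PySem.Int.mod (a + j) n + 1) a.toNat _ sq hk]
    have hrowlen : (sq.getD a.toNat []).length = n.toNat := by
      rw [List.getD_eq_getElem?_getD, List.getElem?_eq_getElem hk]
      exact hrows _ (List.getElem_mem hk)
    rw [inner_row n (fun j => PySem.Int.mod (a + j) n + 1) n.toNat 0 le_rfl (by omega) _ hrowlen]
    have hrowF : (PySem.List.pyRange 0 n 1).map (fun j => PySem.Int.mod (a + j) n + 1) = rowF n a := by
      apply List.ext_getElem
      · simp [rowF, PySem.List.length_pyRange_one]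
      · intro k hk1 hk2
        rw [List.getElem_map, PySem.List.getElem_pyRange_one, getElem_rowF n a k hk2]
        norm_num
    rw [hrowF]
    simp only [Int.toNat_zero, List.take_zero, List.nil_append]
    rw [ih (a + 1) (by omega) (by omega) _ (by simpa using hlen)
        (by intro r hr
            rcases List.mem_or_eq_of_mem_set hr with h | h
            · exact hrows _ h
            · rw [h]; exact length_rowF n a)]
    rw [show (a + 1).toNat = a.toNat + 1 by omega]
    rw [take_succ_set sq a.toNat (rowF n a) hk]
    simp

theorem A_eq (n : Int) (hn : 0 < n) :
    latin_square n = some ((List.range n.toNat).map (fun (k : Nat) => rowF n (k : Int))) := by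
  unfold latin_square
  rw [if_neg (by omega)]
  congr 1
  have hlen : ((PySem.List.pyRange 0 n 1).map (fun _ => List.replicate n.toNat (0 : Int))).length = n.toNat := by
    simp [PySem.List.length_pyRange_one]
  rw [outer_loop n hn n.toNat 0 le_rfl (by omega) _ hlen (by intro r hr; simp at hr; simp [hr])]
  simp only [Int.toNat_zero, List.take_zero, List.nil_append]
  rw [map_pyRange_zero]

-- rotation advances the row formula by one
theorem rot_row (n : Int) (hn : 0 < n) (i : Int) :
    PySem.List.slice (rowF n i) (some 1) none ++ PySem.List.slice (rowF n i) none (some 1)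
      = rowF n (i + 1) := by
  rw [PySem.List.slice_from_one, PySem.List.slice_to (rowF n i) (show (0:Int) ≤ 1 by omega)]
  have hN : 0 < n.toNat := by omega
  have hlen : (rowF n i).length = n.toNat := length_rowF n i
  have htl : (rowF n i).tail.length = n.toNat - 1 := by rw [List.length_tail, hlen]
  apply List.ext_getElem
  · simp only [List.length_append, htl, List.length_take, hlen, length_rowF]
    omega
  · intro k h1 h2
    rw [length_rowF] at h2
    by_cases hk : k < n.toNat - 1
    · rw [List.getElem_append_left (by rw [htl]; omega)]
      rw [List.getElem_tail, getElem_rowF n i (k + 1) (by rw [hlen]; omega),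
          getElem_rowF n (i + 1) k (by rw [length_rowF]; omega)]
      congr 2
      push_cast
      ring
    · have hke : k = n.toNat - 1 := by omega
      rw [List.getElem_append_right (by rw [htl]; omega)]
      have idx0 : k - (rowF n i).tail.length = 0 := by rw [htl]; omega
      simp only [idx0, List.getElem_take]
      rw [getElem_rowF n i 0 (by rw [hlen]; omega), getElem_rowF n (i + 1) k (by rw [length_rowF]; omega)]
      rw [PySem.Int.mod_eq_emod_of_pos hn, PySem.Int.mod_eq_emod_of_pos hn]
      have e1 : i + 1 + (k : Int) = (i + (0 : Nat)) + n * 1 := by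
        have : (k : Int) = n - 1 := by omega
        rw [this]
        push_cast
        ring
      rw [e1, Int.add_mul_emod_self_left]

theorem first_row (n : Int) (hn : 0 < n) :
    PySem.List.pyRange 1 (n + 1) 1 = rowF n 0 := by
  apply List.ext_getElem
  · simp [rowF, PySem.List.length_pyRange_one]
  · intro k h1 h2
    rw [PySem.List.length_pyRange_one] at h1
    rw [PySem.List.getElem_pyRange_one, getElem_rowF n 0 k h2]
    rw [PySem.Int.mod_eq_emod_of_pos hn]
    have : (0 + (k : Int)) % n = 0 + (k : Int) :=
      Int.emod_eq_of_lt (by omega) (by omega)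
    rw [this]
    ring

theorem B_loop (n : Int) (hn : 0 < n) :
    ∀ (L : List Int) (i : Int) (sq : List (List Int)),
    L.foldl (fun (st : List Int × List (List Int)) _ =>
        let r := PySem.List.slice st.1 (some 1) none ++ PySem.List.slice st.1 none (some 1)
        (r, st.2 ++ [r])) (rowF n i, sq)
      = (rowF n (i + L.length), sq ++ (List.range L.length).map (fun (t : Nat) => rowF n (i + 1 + (t : Int)))) := by
  intro L
  induction L with
  | nil => intro i sq; simp
  | cons x L ih =>
    intro i sq
    simp only [List.foldl_cons]
    simp only [rot_row n hn i]
    rw [ih (i + 1)]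
    simp only [Prod.mk.injEq]
    constructor
    · congr 1; simp only [List.length_cons]; push_cast; ring
    · simp only [List.length_cons]
      rw [List.range_succ_eq_map, List.map_cons, List.map_map]
      simp only [Nat.cast_zero, add_zero, List.append_assoc, List.singleton_append]
      congr 1
      congr 1
      apply List.map_congr_left
      intro t _
      simp only [Function.comp]
      congr 1
      push_cast
      ring

theorem B_eq (n : Int) (hn : 0 < n) :
    latin_square_alt n = some ((List.range n.toNat).map (fun (k : Nat) => rowF n (k : Int))) := by
  unfold latin_square_alt
  rw [if_neg (by omega)]
  simp only [first_row n hn]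
  rw [B_loop n hn (PySem.List.pyRange 0 (n - 1) 1) 0 [rowF n 0]]
  simp only [PySem.List.length_pyRange_one]
  congr 1
  have hsplit : n.toNat = (n - 1 - 0).toNat + 1 := by omega
  rw [hsplit, List.range_succ_eq_map, List.map_cons, List.map_map]
  simp only [Nat.cast_zero, List.singleton_append, List.cons.injEq]
  constructor
  · norm_num
  · apply List.map_congr_left
    intro t _
    simp only [Function.comp]
    congr 1
    push_cast
    ring

-- ===== VERDICT (by name: the statement is the Claim_ definition above) =====
theorem latin_square_spec : Claim_equal_latin_square := by
  intro n _
  unfold Spec_latin_square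
  by_cases hn : n ≤ 0
  · simp [latin_square, latin_square_alt, hn]
  · rw [A_eq n (by omega), B_eq n (by omega)]
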